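-- pv_equiv track=rewrite | github.com/VidhyaPonnusamy-gce/Mount-Blue-job-challenge-codes | Mount-blue-sec8-3.py | sum_xor
-- ===== SOURCE A (Python) =====
-- def sum_xor(n):
--     count=0
--     for i in range(n):
--         sums=n+i
--         xor=n^i
--         if sums==xor:
--             count+=1
--     return count
-- ===== SOURCE B (Python) =====
-- def sum_xor(n):
--     # count zero bits below the highest set bit of n; answer is 2**that
--     if n <= 0:
--         return 0
--     z = 0
--     m = n
--     while m > 1:
--         if m % 2 == 0:
--             z += 1
--         m //= 2
--     return 2 ** z
-- ===== Notes on version B (the rewrite author's own statement) =====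
-- stated objective: faster
-- what changed: Replaced the O(n) scan testing n+i==n^i for every i<n with the closed form 2**(number of zero bits below the highest set bit of n), computed by a single O(log n) loop over n's bits.
import Mathlib
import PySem

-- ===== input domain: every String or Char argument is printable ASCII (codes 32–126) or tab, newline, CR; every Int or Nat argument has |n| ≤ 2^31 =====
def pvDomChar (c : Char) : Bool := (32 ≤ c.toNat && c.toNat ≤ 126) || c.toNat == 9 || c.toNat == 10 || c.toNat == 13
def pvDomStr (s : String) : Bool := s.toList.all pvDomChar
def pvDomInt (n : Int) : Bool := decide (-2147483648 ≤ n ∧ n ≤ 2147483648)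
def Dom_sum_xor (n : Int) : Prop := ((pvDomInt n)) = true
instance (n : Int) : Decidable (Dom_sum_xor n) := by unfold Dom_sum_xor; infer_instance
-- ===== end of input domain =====

-- B replaces A's O(n) scan by the closed form 2^(zero bits below the highest set bit of n),
-- an O(log n) loop over the bits of n (objective: faster, asymptotic).

-- ===== PORT A =====
def sum_xor (n : Int) : Int :=
  (PySem.List.pyRange 0 n 1).foldl
    (fun count i => if n + i = PySem.Int.bxor n i then count + 1 else count) 0

-- ===== PORT B =====
-- the 'while m > 1' loop of Source B, accumulating the number of zero bits seen
def pvZeros (m : Int) : Nat :=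
  if 1 < m then
    (if PySem.Int.mod m 2 = 0 then 1 else 0) + pvZeros (PySem.Int.floordiv m 2)
  else 0
termination_by m.toNat
decreasing_by
  rw [PySem.Int.floordiv_eq_ediv_of_pos (by omega : (0:Int) < 2)]
  omega

def sum_xor_alt (n : Int) : Int :=
  if n ≤ 0 then 0 else 2 ^ pvZeros n

-- ===== PRECONDITION & SPEC =====
def Spec_sum_xor (n : Int) (out : Int) : Prop := out = sum_xor_alt n
instance (n : Int) (out : Int) : Decidable (Spec_sum_xor n out) := by unfold Spec_sum_xor; infer_instance

-- ===== CLAIM (what is proved, stated in full; the proofs are below) =====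
def Claim_equal_sum_xor : Prop := ∀ (n : Int), Dom_sum_xor n → Spec_sum_xor n (sum_xor n)

-- ===== LEMMAS AND PROOFS =====

-- Nat-level count of i < n with n &&& i = 0 (what A computes, see pvA_count below)
def pvC (n : Nat) : Nat := (List.range n).countP (fun j => n &&& j == 0)

-- Nat-level mirror of pvZeros
def pvZ (n : Nat) : Nat :=
  if 1 < n then (if n % 2 = 0 then 1 else 0) + pvZ (n / 2) else 0

-- A's fold is a countP
theorem pv_foldl_count (p : Int → Prop) [DecidablePred p] (l : List Int) (c : Int) :
    l.foldl (fun c i => if p i then c + 1 else c) c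
      = c + (l.countP (fun i => decide (p i)) : Int) := by
  induction l generalizing c with
  | nil => simp
  | cons x xs ih =>
    by_cases h : p x <;> simp [h, ih] <;> try ring

-- bit-decomposition facts for &&& and ^^^
theorem pv_land_ee (a b : Nat) : (2 * a) &&& (2 * b) = 2 * (a &&& b) := by
  simpa [Nat.bit] using Nat.land_bit false a false b

theorem pv_land_eo (a b : Nat) : (2 * a) &&& (2 * b + 1) = 2 * (a &&& b) := by
  simpa [Nat.bit] using Nat.land_bit false a true b

theorem pv_land_oe (a b : Nat) : (2 * a + 1) &&& (2 * b) = 2 * (a &&& b) := by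
  simpa [Nat.bit] using Nat.land_bit true a false b

theorem pv_land_oo (a b : Nat) : (2 * a + 1) &&& (2 * b + 1) = 2 * (a &&& b) + 1 := by
  simpa [Nat.bit] using Nat.land_bit true a true b

theorem pv_xor_ee (a b : Nat) : (2 * a) ^^^ (2 * b) = 2 * (a ^^^ b) := by
  simpa [Nat.bit] using Nat.xor_bit false a false b

theorem pv_xor_eo (a b : Nat) : (2 * a) ^^^ (2 * b + 1) = 2 * (a ^^^ b) + 1 := by
  simpa [Nat.bit] using Nat.xor_bit false a true b

theorem pv_xor_oe (a b : Nat) : (2 * a + 1) ^^^ (2 * b) = 2 * (a ^^^ b) + 1 := by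
  simpa [Nat.bit] using Nat.xor_bit true a false b

theorem pv_xor_oo (a b : Nat) : (2 * a + 1) ^^^ (2 * b + 1) = 2 * (a ^^^ b) := by
  simpa [Nat.bit] using Nat.xor_bit true a true b

-- a + b = (a ^^^ b) + 2 * (a &&& b)
theorem pv_add_eq_xor_add (a : Nat) : ∀ b, a + b = (a ^^^ b) + 2 * (a &&& b) := by
  induction a using Nat.strong_induction_on with
  | _ a ih =>
    intro b
    rcases Nat.eq_zero_or_pos a with ha | ha
    · simp [ha]
    · obtain ⟨a', ra, ha', hra⟩ : ∃ a' r, a = 2 * a' + r ∧ r < 2 :=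
        ⟨a / 2, a % 2, by omega, by omega⟩
      obtain ⟨b', rb, hb', hrb⟩ : ∃ b' r, b = 2 * b' + r ∧ r < 2 :=
        ⟨b / 2, b % 2, by omega, by omega⟩
      have hlt : a' < a := by omega
      have := ih a' hlt b'
      interval_cases ra <;> interval_cases rb <;>
        simp only [ha', hb', Nat.add_zero, pv_land_ee, pv_land_eo, pv_land_oe, pv_land_oo,
          pv_xor_ee, pv_xor_eo, pv_xor_oe, pv_xor_oo] <;> omega

theorem pv_add_eq_xor_iff (a b : Nat) : a + b = a ^^^ b ↔ a &&& b = 0 := by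
  have := pv_add_eq_xor_add a b
  omega

-- countP over range (2*m) splits into the even and odd halves
theorem pv_countP_range_two_mul (p : Nat → Bool) (m : Nat) :
    (List.range (2 * m)).countP p
      = (List.range m).countP (fun j => p (2 * j))
        + (List.range m).countP (fun j => p (2 * j + 1)) := by
  induction m with
  | zero => simp
  | succ m ih =>
    have h2 : 2 * (m + 1) = (2 * m + 1) + 1 := by ring
    rw [h2, List.range_succ, List.range_succ, List.range_succ]
    simp only [List.countP_append, ih, List.countP_singleton]
    omega

-- the closed form: pvC n = 2 ^ pvZ n for n ≥ 1
theorem pv_main (n : Nat) (hn : 1 ≤ n) : pvC n = 2 ^ pvZ n := by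
  induction n using Nat.strong_induction_on with
  | _ n ih =>
    rcases Nat.lt_or_ge n 2 with h2 | h2
    · interval_cases n
      · rw [pvZ]; decide
    · set m := n / 2 with hm
      have hm1 : 1 ≤ m := by omega
      have hmlt : m < n := by omega
      have ihm := ih m hmlt hm1
      rcases Nat.even_or_odd n with ⟨k, hk⟩ | ⟨k, hk⟩
      · -- n = 2 * m even
        have hnk : n = 2 * m := by omega
        have hC : pvC n = 2 * pvC m := by
          rw [pvC, hnk, pv_countP_range_two_mul]
          have e1 : ∀ j : Nat, ((2 * m) &&& (2 * j) == 0) = ((m &&& j) == 0) := by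
            intro j; rw [pv_land_ee]; simp
          have e2 : ∀ j : Nat, ((2 * m) &&& (2 * j + 1) == 0) = ((m &&& j) == 0) := by
            intro j; rw [pv_land_eo]; simp
          simp only [e1, e2, pvC]
          omega
        have hZ : pvZ n = 1 + pvZ m := by
          rw [pvZ]
          have : n % 2 = 0 := by omega
          simp [show 1 < n from by omega, this, hm]
        rw [hC, hZ, ihm, pow_add, pow_one]
      · -- n = 2 * m + 1 odd
        have hnk : n = 2 * m + 1 := by omega
        have hC : pvC n = pvC m := by
          rw [pvC, hnk, List.range_succ, List.countP_append, pv_countP_range_two_mul,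
            List.countP_singleton]
          have e1 : ∀ j : Nat, ((2 * m + 1) &&& (2 * j) == 0) = ((m &&& j) == 0) := by
            intro j; rw [pv_land_oe]; simp
          have e2 : ∀ j : Nat, ((2 * m + 1) &&& (2 * j + 1) == 0) = false := by
            intro j; rw [pv_land_oo]; simp
          simp only [e1, e2, pvC, List.countP_eq_length_filter, Nat.and_self]
          have : (m == 0) = false := by simp; omega
          simp [this]
        have hZ : pvZ n = pvZ m := by
          rw [pvZ]
          have : n % 2 = 1 := by omega
          simp [show 1 < n from by omega, this, hm]
        rw [hC, hZ, ihm]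

-- A computes pvC on positive n
theorem pvA_count (n : Int) (hn : 0 < n) : sum_xor n = (pvC n.toNat : Int) := by
  unfold sum_xor
  rw [PySem.List.pyRange_one, pv_foldl_count, Int.sub_zero, zero_add]
  rw [List.countP_map, pvC, List.countP_eq_length_filter, List.countP_eq_length_filter]
  congr 1
  apply congrArg List.length
  apply List.filter_congr
  intro k _
  simp only [Function.comp, zero_add]
  have hcast : n = ((n.toNat : Nat) : Int) := by omega
  rw [hcast, PySem.Int.bxor_natCast]
  have h1 : (((n.toNat : Nat) : Int) + (k : Int) = ((n.toNat ^^^ k : Nat) : Int))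
      ↔ (n.toNat &&& k = 0) := by
    rw [← pv_add_eq_xor_iff]
    omega
  rw [decide_eq_decide.mpr h1]
  · rw [Int.toNat_natCast]
    by_cases h : n.toNat &&& k = 0
    · rw [decide_eq_true h, beq_iff_eq.mpr h]
    · rw [decide_eq_false h, beq_eq_false_iff_ne.mpr h]

-- pvZeros agrees with pvZ on positive n
theorem pvZeros_eq_aux : ∀ (k : Nat) (n : Int), 0 < n → n.toNat = k → pvZeros n = pvZ k := by
  intro k
  induction k using Nat.strong_induction_on with
  | _ k ih =>
    intro n hn hk
    rw [pvZeros, pvZ]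
    by_cases h1 : 1 < n
    · have hfd : PySem.Int.floordiv n 2 = n / 2 := PySem.Int.floordiv_eq_ediv_of_pos (by omega)
      have hmod : PySem.Int.mod n 2 = n % 2 := PySem.Int.mod_eq_emod_of_pos (by omega)
      have hrec : pvZeros (PySem.Int.floordiv n 2) = pvZ (k / 2) := by
        apply ih (k / 2) (by omega) _ (by rw [hfd]; omega)
        rw [hfd]; omega
      have hcond : (PySem.Int.mod n 2 = 0) ↔ (k % 2 = 0) := by rw [hmod]; omega
      rw [hrec]
      have h1k : 1 < k := by omega
      by_cases hc : PySem.Int.mod n 2 = 0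
      · rw [if_pos h1, if_pos (by omega : 1 < (k:Nat)), if_pos hc, if_pos (hcond.mp hc)]
      · rw [if_pos h1, if_pos (by omega : 1 < (k:Nat)), if_neg hc,
          if_neg (fun h => hc (hcond.mpr h))]
    · rw [if_neg h1, if_neg (by omega : ¬ 1 < (k:Nat))]

theorem pvZeros_eq (n : Int) (hn : 0 < n) : pvZeros n = pvZ n.toNat :=
  pvZeros_eq_aux n.toNat n hn rfl

-- ===== VERDICT (by name: the statement is the Claim_ definition above) =====
theorem sum_xor_spec : Claim_equal_sum_xor := by
  intro n _
  unfold Spec_sum_xor sum_xor_alt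
  by_cases hn : n ≤ 0
  · simp [hn, sum_xor, PySem.List.pyRange_one_eq_nil hn]
  · have hn' : 0 < n := by omega
    rw [if_neg hn, pvA_count n hn', pvZeros_eq n hn', pv_main n.toNat (by omega)]
    push_cast
    rfl
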